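-- pv_equiv track=rewrite | github.com/cdimegl1/Classwork | Python Decision Tree/dTree.py | countf
-- ===== SOURCE A (Python) =====
-- def countf(data, feature):
--     att_class = 0
--     notatt_class = 0
--     att_notclass = 0
--     notatt_notclass = 0
--     for row in data:
--         if row[feature] == '1':
--             if row['Class'] == '1':
--                 att_class += 1
--             else:
--                 att_notclass += 1
--         elif row['Class'] == '1':
--             notatt_class += 1
--         else:
--             notatt_notclass += 1
--     return (att_class, notatt_class, att_notclass, notatt_notclass)
-- ===== SOURCE B (Python) =====
-- def countf(data, feature):
--     n = len(data)
--     f = sum(1 for row in data if row[feature] == '1')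
--     c = sum(1 for row in data if row['Class'] == '1')
--     fc = sum(1 for row in data if row[feature] == '1' and row['Class'] == '1')
--     return (fc, c - fc, f - fc, n - f - c + fc)
-- ===== Notes on version B (the rewrite author's own statement) =====
-- stated objective: alternative
-- what changed: Replaces the single four-way branching pass with three independent marginal/joint counts (feature=='1', Class=='1', both) plus the length, deriving the four cells by inclusion-exclusion arithmetic.
import Mathlib
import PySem

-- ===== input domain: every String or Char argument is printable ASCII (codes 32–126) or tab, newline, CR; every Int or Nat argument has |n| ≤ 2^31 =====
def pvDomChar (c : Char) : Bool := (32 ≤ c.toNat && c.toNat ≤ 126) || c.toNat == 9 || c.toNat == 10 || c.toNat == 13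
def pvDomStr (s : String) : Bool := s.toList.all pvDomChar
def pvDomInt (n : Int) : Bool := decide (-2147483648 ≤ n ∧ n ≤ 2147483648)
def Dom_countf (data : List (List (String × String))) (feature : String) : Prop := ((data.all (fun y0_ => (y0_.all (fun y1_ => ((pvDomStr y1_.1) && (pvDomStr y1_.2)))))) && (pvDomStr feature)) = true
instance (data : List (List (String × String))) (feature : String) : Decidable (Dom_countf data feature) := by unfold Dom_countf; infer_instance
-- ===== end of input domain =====

-- B replaces A's four-way branching pass by three marginal/joint counts plus the
-- length and derives the four cells by inclusion-exclusion arithmetic (alternative decomposition).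


-- shared dict-indexing helper: row[k] with first-match lookup; "" only outside Pre_ (KeyError in Python)
def pvGet (row : List (String × String)) (k : String) : String :=
  ((row.find? (fun p => p.1 == k)).map Prod.snd).getD ""

-- ===== PORT A =====
def countf (data : List (List (String × String))) (feature : String) : Int × Int × Int × Int :=
  data.foldl
    (fun acc row =>
      match acc with
      | (att_class, notatt_class, att_notclass, notatt_notclass) =>
        if pvGet row feature == "1" then
          if pvGet row "Class" == "1" then
            (att_class + 1, notatt_class, att_notclass, notatt_notclass)
          else
            (att_class, notatt_class, att_notclass + 1, notatt_notclass)
        else if pvGet row "Class" == "1" then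
          (att_class, notatt_class + 1, att_notclass, notatt_notclass)
        else
          (att_class, notatt_class, att_notclass, notatt_notclass + 1))
    (0, 0, 0, 0)

-- ===== PORT B =====
def countf_alt (data : List (List (String × String))) (feature : String) : Int × Int × Int × Int :=
  let n : Int := data.length
  let f : Int := data.countP (fun row => pvGet row feature == "1")
  let c : Int := data.countP (fun row => pvGet row "Class" == "1")
  let fc : Int := data.countP (fun row => pvGet row feature == "1" && pvGet row "Class" == "1")
  (fc, c - fc, f - fc, n - f - c + fc)

-- ===== PRECONDITION & SPEC =====
-- Pre_: every row contains the feature key and the 'Class' key; otherwise Python A raises KeyError.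
def Pre_countf (data : List (List (String × String))) (feature : String) : Prop :=
  ∀ row ∈ data, feature ∈ row.map Prod.fst ∧ "Class" ∈ row.map Prod.fst
instance (data : List (List (String × String))) (feature : String) : Decidable (Pre_countf data feature) := by unfold Pre_countf; infer_instance
def pvWitness_countf : (List (List (String × String))) × String :=
  ([[("f", "1"), ("Class", "0")], [("f", "0"), ("Class", "1")]], "f")
def Spec_countf (data : List (List (String × String))) (feature : String) (out : Int × Int × Int × Int) : Prop := out = countf_alt data feature
instance (data : List (List (String × String))) (feature : String) (out : Int × Int × Int × Int) : Decidable (Spec_countf data feature out) := by unfold Spec_countf; infer_instance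

-- ===== CLAIM (what is proved, stated in full; the proofs are below) =====
def Claim_equal_countf : Prop := ∀ (data : List (List (String × String))) (feature : String), Dom_countf data feature → Pre_countf data feature → Spec_countf data feature (countf data feature)

-- ===== LEMMAS AND PROOFS =====

-- A's fold, from any start, adds the three counts-and-length combination B computes.
theorem countf_foldl_eq (feature : String) (l : List (List (String × String)))
    (a b c d : Int) :
    l.foldl
      (fun acc row =>
        match acc with
        | (att_class, notatt_class, att_notclass, notatt_notclass) =>
          if pvGet row feature == "1" then
            if pvGet row "Class" == "1" then
              (att_class + 1, notatt_class, att_notclass, notatt_notclass)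
            else
              (att_class, notatt_class, att_notclass + 1, notatt_notclass)
          else if pvGet row "Class" == "1" then
            (att_class, notatt_class + 1, att_notclass, notatt_notclass)
          else
            (att_class, notatt_class, att_notclass, notatt_notclass + 1))
      (a, b, c, d)
    = (a + (l.countP (fun row => pvGet row feature == "1" && pvGet row "Class" == "1") : Int),
       b + ((l.countP (fun row => pvGet row "Class" == "1") : Int)
            - (l.countP (fun row => pvGet row feature == "1" && pvGet row "Class" == "1") : Int)),
       c + ((l.countP (fun row => pvGet row feature == "1") : Int)
            - (l.countP (fun row => pvGet row feature == "1" && pvGet row "Class" == "1") : Int)),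
       d + ((l.length : Int)
            - (l.countP (fun row => pvGet row feature == "1") : Int)
            - (l.countP (fun row => pvGet row "Class" == "1") : Int)
            + (l.countP (fun row => pvGet row feature == "1" && pvGet row "Class" == "1") : Int))) := by
  induction l generalizing a b c d with
  | nil => simp
  | cons x xs ih =>
    simp only [List.foldl_cons, List.countP_cons, List.length_cons]
    cases hf : (pvGet x feature == "1") <;> cases hc : (pvGet x "Class" == "1") <;>
      simp only [Bool.false_and, Bool.true_and, Bool.false_eq_true, if_true, if_false] <;>
      rw [ih] <;> simp only [Prod.mk.injEq] <;> push_cast <;> omega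

-- ===== VERDICT (by name: the statement is the Claim_ definition above) =====
theorem countf_spec : Claim_equal_countf := by
  intro data feature _ _
  unfold Spec_countf countf countf_alt
  rw [countf_foldl_eq]
  simp
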